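-- pv_equiv track=rewrite | github.com/swatibajaj54/Python-for-genomics | main.py | orf_count
-- ===== SOURCE A (Python) =====
-- def orf_count(
--     start_position, seqs
-- ):  # returns orf with maximum length, its index and identifier.
--     orfs_dict = {}
--     for name in seqs:
--         seq = seqs[name]
--         i = start_position
--         while i <= len(seq) - 3:
--             codon = seq[i : i + 3]
--             if codon == "ATG":
--                 j = i
--                 while j <= len(seq) - 3:
--                     stop_codon = seq[j : j + 3]
--                     if stop_codon in ["TAA", "TAG", "TGA"]:
--                         orf = seq[i : j + 3]
--                         orfs_dict[f"{name}_{i}"] = orf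
--                         break
--                     j = j + 3
--             i = i + 3
--     max_length = 0
--     for key, value in orfs_dict.items():
--         length = len(value)
--         if length > max_length:
--             max_length = length
--     for key, val in orfs_dict.items():
--         if len(val) == max_length:
--             return key, val, max_length
-- ===== SOURCE B (Python) =====
-- def orf_count(start_position, seqs):
--     # single in-frame pass per sequence: collect pending ATG starts, close them all
--     # at each in-frame stop codon; track the first longest ORF on the fly.
--     best = None
--     best_len = -1
--     for name in seqs:
--         seq = seqs[name]
--         pending = []
--         i = start_position
--         while i <= len(seq) - 3:
--             codon = seq[i : i + 3]
--             if codon == "ATG":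
--                 pending.append(i)
--             if codon in ("TAA", "TAG", "TGA"):
--                 for s in pending:
--                     orf = seq[s : i + 3]
--                     if len(orf) > best_len:
--                         best_len = len(orf)
--                         best = (f"{name}_{s}", orf, len(orf))
--                 pending = []
--             i += 3
--     return best
-- ===== Notes on version B (the rewrite author's own statement) =====
-- stated objective: alternative
-- what changed: A rescans forward for a stop codon from every ATG and then makes two more passes over the collected ORF dict to pick the maximum; B makes a single in-frame pass per sequence, closing all pending ATG starts at each stop codon, and tracks the first longest ORF on the fly.
import Mathlib
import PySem

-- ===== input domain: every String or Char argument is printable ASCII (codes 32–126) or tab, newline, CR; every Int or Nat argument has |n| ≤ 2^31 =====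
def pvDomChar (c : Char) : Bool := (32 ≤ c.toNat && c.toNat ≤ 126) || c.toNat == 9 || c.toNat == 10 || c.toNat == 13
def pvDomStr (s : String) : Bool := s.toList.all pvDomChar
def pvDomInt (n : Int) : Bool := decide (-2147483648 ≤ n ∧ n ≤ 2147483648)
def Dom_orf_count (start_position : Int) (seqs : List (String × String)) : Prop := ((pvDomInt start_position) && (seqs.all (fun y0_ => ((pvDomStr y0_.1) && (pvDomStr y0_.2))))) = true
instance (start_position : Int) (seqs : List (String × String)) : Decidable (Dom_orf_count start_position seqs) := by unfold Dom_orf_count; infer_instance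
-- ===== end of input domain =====

-- B makes a single in-frame pass per sequence (closing all pending ATG starts at each stop
-- codon) instead of A's rescan-for-a-stop from every ATG, and tracks the first longest ORF
-- on the fly instead of A's two extra passes over the collected dict.

def pvATG : List Char := ['A', 'T', 'G']
def pvStops : List (List Char) := [['T', 'A', 'A'], ['T', 'A', 'G'], ['T', 'G', 'A']]
def pvKey (name : String) (i : Int) : String := name ++ "_" ++ PySem.Int.toStr i

-- ===== PORT A =====
-- inner `while j` loop: scan forward for the first in-frame stop codon, insert the ORF on hit
def pvAInner (name : String) (cs : List Char) (i j : Int)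
    (d : PySem.Dict String (List Char)) : PySem.Dict String (List Char) :=
  if _h : j ≤ (cs.length : Int) - 3 then
    if PySem.List.slice cs (some j) (some (j + 3)) ∈ pvStops then
      d.insert (pvKey name i) (PySem.List.slice cs (some i) (some (j + 3)))
    else pvAInner name cs i (j + 3) d
  else d
termination_by ((cs.length : Int) - 2 - j).toNat
decreasing_by omega

-- outer `while i` loop of A
def pvAOuter (name : String) (cs : List Char) (i : Int)
    (d : PySem.Dict String (List Char)) : PySem.Dict String (List Char) :=
  if _h : i ≤ (cs.length : Int) - 3 then
    pvAOuter name cs (i + 3)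
      (if PySem.List.slice cs (some i) (some (i + 3)) = pvATG then pvAInner name cs i i d else d)
  else d
termination_by ((cs.length : Int) - 2 - i).toNat
decreasing_by omega

def orf_count (start_position : Int) (seqs : List (String × String)) :
    Option (String × String × Int) :=
  let orfs := (PySem.Dict.ofList seqs).items.foldl
    (fun d kv => pvAOuter kv.1 kv.2.toList start_position d) PySem.Dict.empty
  let maxLen : Int := orfs.items.foldl
    (fun m kv => if (kv.2.length : Int) > m then (kv.2.length : Int) else m) 0
  match orfs.items.find? (fun kv => (kv.2.length : Int) == maxLen) with
  | some kv => some (kv.1, String.ofList kv.2, maxLen)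
  | none => none

-- ===== PORT B =====
-- B's single pass: collect pending ATG starts, close them all at each in-frame stop,
-- keeping the first longest ORF seen so far (strict improvement keeps the first).
def pvBScan (name : String) (cs : List Char) (i : Int) (pending : List Int)
    (acc : List (String × List Char)) : List (String × List Char) :=
  if _h : i ≤ (cs.length : Int) - 3 then
    let codon := PySem.List.slice cs (some i) (some (i + 3))
    let pending' := if codon = pvATG then pending ++ [i] else pending
    if codon ∈ pvStops then
      pvBScan name cs (i + 3) []
        (acc ++ pending'.map (fun p => (pvKey name p, PySem.List.slice cs (some p) (some (i + 3)))))
    else pvBScan name cs (i + 3) pending' acc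
  else acc
termination_by ((cs.length : Int) - 2 - i).toNat
decreasing_by all_goals omega

def orf_count_alt (start_position : Int) (seqs : List (String × String)) :
    Option (String × String × Int) :=
  let entries := (PySem.Dict.ofList seqs).items.foldl
    (fun acc kv => pvBScan kv.1 kv.2.toList start_position [] acc) []
  (entries.foldl
    (fun best kv =>
      if (kv.2.length : Int) > best.2 then
        (some (kv.1, String.ofList kv.2, (kv.2.length : Int)), (kv.2.length : Int))
      else best)
    ((none : Option (String × String × Int)), (-1 : Int))).1

-- ===== PRECONDITION & SPEC =====
def Spec_orf_count (start_position : Int) (seqs : List (String × String)) (out : Option (String × String × Int)) : Prop := out = orf_count_alt start_position seqs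
instance (start_position : Int) (seqs : List (String × String)) (out : Option (String × String × Int)) : Decidable (Spec_orf_count start_position seqs out) := by unfold Spec_orf_count; infer_instance

-- ===== CLAIM (what is proved, stated in full; the proofs are below) =====
def Claim_equal_orf_count : Prop := ∀ (start_position : Int) (seqs : List (String × String)), Dom_orf_count start_position seqs → Spec_orf_count start_position seqs (orf_count start_position seqs)

-- ===== LEMMAS AND PROOFS =====

-- first in-frame stop codon at or after j
def pvFirstStop (cs : List Char) (j : Int) : Option Int :=
  if _h : j ≤ (cs.length : Int) - 3 then
    if PySem.List.slice cs (some j) (some (j + 3)) ∈ pvStops then some j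
    else pvFirstStop cs (j + 3)
  else none
termination_by ((cs.length : Int) - 2 - j).toNat
decreasing_by omega

-- the (start, orf) events a run over cs from position i produces, in order
def pvEvents (cs : List Char) (i : Int) : List (Int × List Char) :=
  if _h : i ≤ (cs.length : Int) - 3 then
    (if PySem.List.slice cs (some i) (some (i + 3)) = pvATG then
      (match pvFirstStop cs i with
       | some j => [(i, PySem.List.slice cs (some i) (some (j + 3)))]
       | none => [])
     else []) ++ pvEvents cs (i + 3)
  else []
termination_by ((cs.length : Int) - 2 - i).toNat
decreasing_by omega

-- the per-run list of (key, orf) entries, over all sequences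
def pvBig (sp : Int) (its : List (String × String)) : List (String × List Char) :=
  its.flatMap (fun kv => (pvEvents kv.2.toList sp).map (fun e => (pvKey kv.1 e.1, e.2)))

-- A's running maximum of the entry lengths
def pvMax (l : List (String × List Char)) (m : Int) : Int :=
  l.foldl (fun m kv => if (kv.2.length : Int) > m then (kv.2.length : Int) else m) m

theorem pvAInner_eq (name : String) (cs : List Char) (i j : Int) (d : PySem.Dict String (List Char)) :
    pvAInner name cs i j d =
      match pvFirstStop cs j with
      | some k => d.insert (pvKey name i) (PySem.List.slice cs (some i) (some (k + 3)))
      | none => d := by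
  fun_induction pvAInner with
  | case1 j hle hs => rw [pvFirstStop]; simp [hle, hs]
  | case2 j hle hs ih => rw [pvFirstStop]; simp [hle, hs, ih]
  | case3 j hle => rw [pvFirstStop]; simp [hle]

theorem pvAOuter_eq (name : String) (cs : List Char) (i : Int) (d : PySem.Dict String (List Char)) :
    pvAOuter name cs i d =
      (pvEvents cs i).foldl (fun d e => d.insert (pvKey name e.1) e.2) d := by
  fun_induction pvAOuter with
  | case1 i d hle ih =>
    rw [pvEvents]
    simp only [hle, dif_pos, List.foldl_append]
    simp only [dite_eq_ite] at ih
    rw [ih]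
    congr 1
    by_cases hc : PySem.List.slice cs (some i) (some (i + 3)) = pvATG
    · simp only [hc, if_true]
      rw [pvAInner_eq]
      cases hfs : pvFirstStop cs i <;> simp
    · simp [hc]
  | case2 i d hle => rw [pvEvents]; simp [hle]

theorem pvNotATG_of_stop {c : List Char} (h : c ∈ pvStops) : c ≠ pvATG := by
  simp only [pvStops, List.mem_cons, List.not_mem_nil, or_false] at h
  rcases h with h | h | h <;> subst h <;> decide

theorem pvBScan_eq (name : String) (cs : List Char) (i : Int) (P : List Int)
    (acc : List (String × List Char)) :
    pvBScan name cs i P acc =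
      acc ++
      (match pvFirstStop cs i with
       | some j => P.map (fun p => (pvKey name p, PySem.List.slice cs (some p) (some (j + 3))))
       | none => []) ++
      (pvEvents cs i).map (fun e => (pvKey name e.1, e.2)) := by
  fun_induction pvBScan with
  | case1 i P acc hle codon pending' hs ih =>
    have hs' : PySem.List.slice cs (some i) (some (i + 3)) ∈ pvStops := hs
    have hATG' : PySem.List.slice cs (some i) (some (i + 3)) ≠ pvATG := pvNotATG_of_stop hs'
    have hp : pending' = P := by
      show (if h : PySem.List.slice cs (some i) (some (i + 3)) = pvATG then P ++ [i] else P) = P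
      exact dif_neg hATG'
    have hfs0 : pvFirstStop cs i = some i := by rw [pvFirstStop]; simp [hle, hs']
    rw [pvEvents]
    simp only [hle, dif_pos]
    rw [hp] at ih ⊢
    rw [ih]
    cases hfs : pvFirstStop cs (i + 3) <;> simp [hfs0, hATG', List.append_assoc]
  | case2 i P acc hle codon pending' hs ih =>
    have hs' : PySem.List.slice cs (some i) (some (i + 3)) ∉ pvStops := hs
    have hp : pending' =
        if PySem.List.slice cs (some i) (some (i + 3)) = pvATG then P ++ [i] else P := by
      show (if h : PySem.List.slice cs (some i) (some (i + 3)) = pvATG then P ++ [i] else P) = _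
      simp only [dite_eq_ite]
    have hfs0 : pvFirstStop cs i = pvFirstStop cs (i + 3) := by
      rw [pvFirstStop]; simp [hle, hs']
    rw [pvEvents]
    simp only [hle, dif_pos]
    rw [hp] at ih ⊢
    rw [ih]
    by_cases hc : PySem.List.slice cs (some i) (some (i + 3)) = pvATG <;>
      cases hfs : pvFirstStop cs (i + 3) <;>
        simp [hfs0, hfs, hc, List.append_assoc]
  | case3 i P acc hle =>
    have hfs0 : pvFirstStop cs i = none := by rw [pvFirstStop]; simp [hle]
    rw [pvEvents]
    simp [hle, hfs0]

theorem pvEvents_ge (cs : List Char) (i : Int) : ∀ e ∈ pvEvents cs i, i ≤ e.1 := by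
  fun_induction pvEvents with
  | case1 i hle ih =>
    intro e he
    rcases List.mem_append.1 he with h | h
    · by_cases hc : PySem.List.slice cs (some i) (some (i + 3)) = pvATG
      · simp only [hc, if_true] at h
        cases hfs : pvFirstStop cs i <;> rw [hfs] at h <;> simp at h
        · rcases h with ⟨h1, _⟩; omega
      · simp [hc] at h
    · have := ih e h; omega
  | case2 i hle => intro e he; simp at he

theorem pvEvents_fst_nodup (cs : List Char) (i : Int) :
    ((pvEvents cs i).map Prod.fst).Nodup := by
  fun_induction pvEvents with
  | case1 i hle ih =>
    rw [List.map_append, List.nodup_append]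
    refine ⟨?_, ih, ?_⟩
    · by_cases hc : PySem.List.slice cs (some i) (some (i + 3)) = pvATG
      · simp only [hc, if_true]
        cases pvFirstStop cs i <;> simp
      · simp [hc]
    · intro a ha b hb
      have hb' : i + 3 ≤ b := by
        rcases List.mem_map.1 hb with ⟨e, he, rfl⟩
        exact pvEvents_ge cs (i + 3) e he
      have ha' : a = i := by
        by_cases hc : PySem.List.slice cs (some i) (some (i + 3)) = pvATG
        · simp only [hc, if_true] at ha
          cases hfs : pvFirstStop cs i <;> rw [hfs] at ha <;> simp at ha
          · exact ha
        · simp [hc] at ha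
      omega
  | case2 i hle => simp

theorem pvToDigitsCore_eq (f : Nat) : ∀ (n : Nat) (acc : List Char), n < f →
    Nat.toDigitsCore 10 f n acc =
      (if n = 0 then ['0'] else ((Nat.digits 10 n).map Nat.digitChar).reverse) ++ acc := by
  induction f with
  | zero => intro n acc h; omega
  | succ f ih =>
    intro n acc h
    rw [Nat.toDigitsCore]
    by_cases h0 : n / 10 = 0
    · have hn : n < 10 := by omega
      simp only [h0]
      by_cases hz : n = 0
      · subst hz; simp; try decide
      · rw [if_neg hz, Nat.digits_def' (by norm_num) (Nat.pos_of_ne_zero hz)]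
        have : n % 10 = n := Nat.mod_eq_of_lt hn
        rw [Nat.div_eq_of_lt hn, Nat.digits_zero]
        simp [this]
    · simp only [h0]
      have hn0 : n ≠ 0 := by intro hz; subst hz; simp at h0
      have hlt : n / 10 < f := by
        have := Nat.div_lt_self (Nat.pos_of_ne_zero hn0) (by norm_num : 1 < 10)
        omega
      rw [ih (n / 10) _ hlt]
      rw [if_neg h0]
      rw [Nat.digits_def' (by norm_num : 1 < 10) (Nat.pos_of_ne_zero hn0), if_neg hn0]
      simp

theorem pvToDigits_eq (n : Nat) :
    Nat.toDigits 10 n = if n = 0 then ['0'] else ((Nat.digits 10 n).map Nat.digitChar).reverse := by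
  have := pvToDigitsCore_eq (n + 1) n [] (by omega)
  simpa [Nat.toDigits] using this

theorem pvDigitChar_ok (d : Nat) (h : d < 10) : Nat.digitChar d ≠ '_' ∧ Nat.digitChar d ≠ '-' := by
  interval_cases d <;> exact ⟨by decide, by decide⟩

theorem pvToDigits_chars (n : Nat) : ∀ c ∈ Nat.toDigits 10 n, c ≠ '_' ∧ c ≠ '-' := by
  intro c hc
  rw [pvToDigits_eq] at hc
  by_cases hz : n = 0
  · subst hz; simp at hc; subst hc; exact ⟨by decide, by decide⟩
  · rw [if_neg hz, List.mem_reverse] at hc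
    rcases List.mem_map.1 hc with ⟨d, hd, rfl⟩
    exact pvDigitChar_ok d (Nat.digits_lt_base (by norm_num) hd)

theorem pvDigitChar_inj (a b : Nat) (ha : a < 10) (hb : b < 10)
    (h : Nat.digitChar a = Nat.digitChar b) : a = b := by
  interval_cases a <;> interval_cases b <;> first | rfl | (exfalso; exact absurd h (by decide))

theorem pvMapDigitChar_inj : ∀ (l1 l2 : List Nat), (∀ d ∈ l1, d < 10) → (∀ d ∈ l2, d < 10) →
    l1.map Nat.digitChar = l2.map Nat.digitChar → l1 = l2 := by
  intro l1
  induction l1 with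
  | nil => intro l2 _ _ h; cases l2 <;> simp_all
  | cons a l1 ih =>
    intro l2 h1 h2 h
    cases l2 with
    | nil => simp at h
    | cons b l2 =>
      simp only [List.map_cons, List.cons.injEq] at h
      have hab := pvDigitChar_inj a b (h1 a (by simp)) (h2 b (by simp)) h.1
      have := ih l2 (fun d hd => h1 d (by simp [hd])) (fun d hd => h2 d (by simp [hd])) h.2
      simp [hab, this]

theorem pvToDigits_inj (m n : Nat) (h : Nat.toDigits 10 m = Nat.toDigits 10 n) : m = n := by
  rw [pvToDigits_eq, pvToDigits_eq] at h
  by_cases hm : m = 0 <;> by_cases hn : n = 0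
  · omega
  · exfalso
    rw [if_pos hm, if_neg hn] at h
    have : (0 : Nat) ∈ Nat.digits 10 n := by
      have := congrArg List.reverse h
      simp only [List.reverse_reverse] at this
      have h0 : Nat.digitChar 0 ∈ (Nat.digits 10 n).map Nat.digitChar := by
        rw [← this]; simp; try decide
      rcases List.mem_map.1 h0 with ⟨d, hd, hdc⟩
      have := pvDigitChar_inj d 0 (Nat.digits_lt_base (by norm_num) hd) (by norm_num) hdc
      simpa [this] using hd
    have hlast := Nat.getLast_digit_ne_zero 10 hn
    -- digits 10 n = ['0'].map? derive n = 0
    have : Nat.digits 10 n = [0] := by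
      have := congrArg List.reverse h
      simp only [List.reverse_reverse, List.reverse_singleton] at this
      have := pvMapDigitChar_inj (Nat.digits 10 n) [0]
        (fun d hd => Nat.digits_lt_base (by norm_num) hd) (by simp) (by simp [← this]; try decide)
      exact this
    have := congrArg (Nat.ofDigits 10) this
    rw [Nat.ofDigits_digits] at this
    simp [Nat.ofDigits] at this
    exact hn this
  · exfalso
    rw [if_neg hm, if_pos hn] at h
    have : Nat.digits 10 m = [0] := by
      have := congrArg List.reverse h
      simp only [List.reverse_reverse, List.reverse_singleton] at this
      exact pvMapDigitChar_inj (Nat.digits 10 m) [0]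
        (fun d hd => Nat.digits_lt_base (by norm_num) hd) (by simp) (by simp [this]; try decide)
    have := congrArg (Nat.ofDigits 10) this
    rw [Nat.ofDigits_digits] at this
    simp [Nat.ofDigits] at this
    exact hm this
  · rw [if_neg hm, if_neg hn] at h
    have := congrArg List.reverse h
    simp only [List.reverse_reverse] at this
    have := pvMapDigitChar_inj (Nat.digits 10 m) (Nat.digits 10 n)
      (fun d hd => Nat.digits_lt_base (by norm_num) hd)
      (fun d hd => Nat.digits_lt_base (by norm_num) hd) this
    have := congrArg (Nat.ofDigits 10) this
    rwa [Nat.ofDigits_digits, Nat.ofDigits_digits] at this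

theorem pvToChars_chars (n : Int) : ∀ c ∈ PySem.Int.toChars n, c = '-' ∨ (c ≠ '_' ∧ c ≠ '-') := by
  intro c hc
  unfold PySem.Int.toChars at hc
  split at hc
  · rcases List.mem_cons.1 hc with rfl | hc
    · exact Or.inl rfl
    · exact Or.inr (pvToDigits_chars _ c hc)
  · exact Or.inr (pvToDigits_chars _ c hc)

theorem pvToChars_no_underscore (n : Int) : '_' ∉ PySem.Int.toChars n := by
  intro h
  rcases pvToChars_chars n '_' h with h1 | h1
  · exact absurd h1 (by decide)
  · exact h1.1 rfl

theorem pvToChars_inj (m n : Int) (h : PySem.Int.toChars m = PySem.Int.toChars n) : m = n := by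
  unfold PySem.Int.toChars at h
  split at h <;> split at h
  · rename_i hm hn
    simp only [List.cons.injEq, true_and] at h
    have := pvToDigits_inj _ _ h
    omega
  · rename_i hm hn
    exfalso
    have : '-' ∈ Nat.toDigits 10 n.toNat := by rw [← h]; simp
    exact (pvToDigits_chars _ '-' this).2 rfl
  · rename_i hm hn
    exfalso
    have : '-' ∈ Nat.toDigits 10 m.toNat := by rw [h]; simp
    exact (pvToDigits_chars _ '-' this).2 rfl
  · rename_i hm hn
    have := pvToDigits_inj _ _ h
    omega

theorem pvSplit_unique : ∀ (a b d1 d2 : List Char), '_' ∉ d1 → '_' ∉ d2 →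
    a ++ '_' :: d1 = b ++ '_' :: d2 → a = b ∧ d1 = d2 := by
  intro a
  induction a with
  | nil =>
    intro b d1 d2 h1 h2 h
    cases b with
    | nil => simpa using h
    | cons c b =>
      simp only [List.nil_append, List.cons_append, List.cons.injEq] at h
      exfalso
      apply h1
      rw [h.2]
      simp
  | cons c a ih =>
    intro b d1 d2 h1 h2 h
    cases b with
    | nil =>
      simp only [List.nil_append, List.cons_append, List.cons.injEq] at h
      exfalso
      apply h2
      rw [← h.2]
      simp
    | cons c' b =>
      simp only [List.cons_append, List.cons.injEq] at h
      obtain ⟨ha, hd⟩ := ih b d1 d2 h1 h2 h.2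
      exact ⟨by simp [h.1, ha], hd⟩

theorem pvKey_inj (n1 n2 : String) (i1 i2 : Int) (h : pvKey n1 i1 = pvKey n2 i2) :
    n1 = n2 ∧ i1 = i2 := by
  have hl := congrArg String.toList h
  simp only [pvKey, String.toList_append, PySem.Int.toList_toStr] at hl
  have h_ : ("_" : String).toList = ['_'] := rfl
  rw [h_] at hl
  simp only [List.append_assoc, List.singleton_append] at hl
  obtain ⟨ha, hd⟩ := pvSplit_unique _ _ _ _ (pvToChars_no_underscore i1) (pvToChars_no_underscore i2) hl
  exact ⟨String.toList_inj.mp ha, pvToChars_inj i1 i2 hd⟩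

theorem pvMax_le (l : List (String × List Char)) : ∀ m : Int, m ≤ pvMax l m := by
  induction l with
  | nil => intro m; simp [pvMax]
  | cons kv l ih =>
    intro m
    simp only [pvMax, List.foldl_cons]
    by_cases hc : (kv.2.length : Int) > m
    · rw [if_pos hc]
      have := ih (kv.2.length : Int)
      simp only [pvMax] at this
      omega
    · rw [if_neg hc]
      have := ih m
      simp only [pvMax] at this
      exact this

theorem pvSel (l : List (String × List Char)) : ∀ (m : Int) (r : Option (String × String × Int)),
    l.foldl
      (fun best kv =>
        if (kv.2.length : Int) > best.2 then
          (some (kv.1, String.ofList kv.2, (kv.2.length : Int)), (kv.2.length : Int))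
        else best)
      (r, m) =
    ((if pvMax l m = m then r
      else (l.find? (fun kv => (kv.2.length : Int) == pvMax l m)).map
        (fun kv => (kv.1, String.ofList kv.2, (kv.2.length : Int)))),
     pvMax l m) := by
  induction l with
  | nil => intro m r; simp [pvMax]
  | cons kv l ih =>
    intro m r
    rw [List.foldl_cons]
    by_cases hgt : (kv.2.length : Int) > m
    · have hstep : (if (kv.2.length : Int) > (r, m).2 then
            (some (kv.1, String.ofList kv.2, (kv.2.length : Int)), (kv.2.length : Int))
          else (r, m))
          = (some (kv.1, String.ofList kv.2, (kv.2.length : Int)), (kv.2.length : Int)) := by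
        simp [hgt]
      rw [hstep, ih]
      have hM : pvMax (kv :: l) m = pvMax l (kv.2.length : Int) := by
        simp [pvMax, hgt]
      have hge := pvMax_le l ((kv.2.length : Int))
      rw [hM, if_neg (show ¬ pvMax l (kv.2.length : Int) = m by omega), List.find?_cons]
      by_cases he : pvMax l (kv.2.length : Int) = (kv.2.length : Int)
      · have hb : ((kv.2.length : Int) == pvMax l (kv.2.length : Int)) = true := by simp [he]
        rw [hb, if_pos he]
        simp [he]
      · have hb : ((kv.2.length : Int) == pvMax l (kv.2.length : Int)) = false := by
          simp; omega
        rw [hb, if_neg he]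
    · have hstep : (if (kv.2.length : Int) > (r, m).2 then
            (some (kv.1, String.ofList kv.2, (kv.2.length : Int)), (kv.2.length : Int))
          else (r, m)) = (r, m) := by
        simp [hgt]
      rw [hstep, ih]
      have hM : pvMax (kv :: l) m = pvMax l m := by
        simp [pvMax, hgt]
      rw [hM]
      by_cases he : pvMax l m = m
      · rw [if_pos he, if_pos he]
      · rw [if_neg he, if_neg he, List.find?_cons]
        have hge := pvMax_le l m
        have hb : ((kv.2.length : Int) == pvMax l m) = false := by
          simp; omega
        rw [hb]

theorem pvMax_zero_neg_one (kv : String × List Char) (l : List (String × List Char)) :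
    pvMax (kv :: l) 0 = pvMax (kv :: l) (-1) := by
  simp only [pvMax, List.foldl_cons]
  by_cases h0 : (kv.2.length : Int) > 0
  · rw [if_pos h0, if_pos (by omega : (kv.2.length : Int) > -1)]
  · have : (kv.2.length : Int) = 0 := by omega
    rw [if_neg h0, if_pos (by omega : (kv.2.length : Int) > -1), this]

theorem pvBig_nodup (sp : Int) : ∀ (its : List (String × String)),
    (its.map Prod.fst).Nodup → ((pvBig sp its).map Prod.fst).Nodup := by
  intro its
  induction its with
  | nil => intro _; simp [pvBig]
  | cons kv its ih =>
    intro hnd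
    rw [List.map_cons, List.nodup_cons] at hnd
    rw [pvBig, List.flatMap_cons, List.map_append, List.nodup_append]
    refine ⟨?_, ih hnd.2, ?_⟩
    · have hmm : ((pvEvents kv.2.toList sp).map (fun e => (pvKey kv.1 e.1, e.2))).map Prod.fst
          = ((pvEvents kv.2.toList sp).map Prod.fst).map (fun i => pvKey kv.1 i) := by
        simp [List.map_map, Function.comp]
      rw [hmm]
      refine List.Nodup.map ?_ (pvEvents_fst_nodup kv.2.toList sp)
      intro a b hab
      exact (pvKey_inj kv.1 kv.1 a b hab).2
    · intro a ha b hb hab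
      subst hab
      rcases List.mem_map.1 ha with ⟨p, hp, rfl⟩
      rcases List.mem_map.1 hp with ⟨e, he, rfl⟩
      rcases List.mem_map.1 hb with ⟨q, hq, hqe⟩
      rcases List.mem_flatMap.1 (by exact hq) with ⟨kv', hkv', hq'⟩
      rcases List.mem_map.1 hq' with ⟨e', he', rfl⟩
      have := (pvKey_inj kv.1 kv'.1 e.1 e'.1 hqe.symm).1
      exact hnd.1 (this ▸ List.mem_map_of_mem hkv')

theorem pvItems_eq (sp : Int) (its : List (String × String))
    (hnd : (its.map Prod.fst).Nodup) :
    (its.foldl (fun d kv => pvAOuter kv.1 kv.2.toList sp d) PySem.Dict.empty).items =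
      pvBig sp its := by
  have h1 : (fun (d : PySem.Dict String (List Char)) (kv : String × String) =>
        pvAOuter kv.1 kv.2.toList sp d) =
      fun d kv => ((pvEvents kv.2.toList sp).map (fun e => (pvKey kv.1 e.1, e.2))).foldl
        (fun d a => d.insert a.1 a.2) d := by
    funext d kv
    rw [pvAOuter_eq, List.foldl_map]
  rw [h1]
  rw [← List.foldl_flatMap]
  have h2 := PySem.Dict.items_foldl_insert_fresh (pvBig sp its) Prod.fst Prod.snd
    PySem.Dict.empty (fun a _ => PySem.Dict.contains_empty a.1) (pvBig_nodup sp its hnd)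
  simpa [pvBig] using h2

theorem pvEntries_eq (sp : Int) (its : List (String × String)) :
    its.foldl (fun acc kv => pvBScan kv.1 kv.2.toList sp [] acc) [] = pvBig sp its := by
  have h1 : (fun (acc : List (String × List Char)) (kv : String × String) =>
        pvBScan kv.1 kv.2.toList sp [] acc) =
      fun acc kv => acc ++ (pvEvents kv.2.toList sp).map (fun e => (pvKey kv.1 e.1, e.2)) := by
    funext acc kv
    rw [pvBScan_eq]
    cases pvFirstStop kv.2.toList sp <;> simp
  rw [h1, PySem.List.foldl_append_eq_flatMap]
  simp [pvBig]

theorem pvSelect_eq (l : List (String × List Char)) :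
    (match l.find? (fun kv => (kv.2.length : Int) == pvMax l 0) with
     | some kv => some (kv.1, String.ofList kv.2, pvMax l 0)
     | none => (none : Option (String × String × Int))) =
    (l.foldl
      (fun best kv =>
        if (kv.2.length : Int) > best.2 then
          (some (kv.1, String.ofList kv.2, (kv.2.length : Int)), (kv.2.length : Int))
        else best)
      ((none : Option (String × String × Int)), (-1 : Int))).1 := by
  rw [pvSel]
  cases l with
  | nil => simp [pvMax]
  | cons kv l =>
    have hne : ¬ pvMax (kv :: l) (-1) = -1 := by
      have h1 : (-1 : Int) < (if ((kv.2.length : Int)) > -1 then ((kv.2.length : Int)) else -1) := by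
        split <;> omega
      have h2 := pvMax_le l (if ((kv.2.length : Int)) > -1 then ((kv.2.length : Int)) else -1)
      simp only [pvMax] at h2 ⊢
      rw [List.foldl_cons]
      omega
    rw [← pvMax_zero_neg_one]
    rw [if_neg (by rw [pvMax_zero_neg_one]; exact hne)]
    cases hf : (kv :: l).find? (fun p => (p.2.length : Int) == pvMax (kv :: l) 0) with
    | none => rfl
    | some kv' =>
      have := List.find?_some hf
      have hlen : (kv'.2.length : Int) = pvMax (kv :: l) 0 := by
        simpa using this
      simp [hlen]

-- ===== VERDICT (by name: the statement is the Claim_ definition above) =====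
theorem orf_count_spec : Claim_equal_orf_count := by
  intro sp seqs _
  unfold Spec_orf_count
  simp only [orf_count, orf_count_alt]
  have hnd : (((PySem.Dict.ofList seqs).items).map Prod.fst).Nodup := by
    have := PySem.Dict.nodup_keys_ofList seqs
    simpa [PySem.Dict.keys] using this
  rw [pvItems_eq sp _ hnd, pvEntries_eq sp _]
  have h := pvSelect_eq (pvBig sp (PySem.Dict.ofList seqs).items)
  simpa [pvMax] using h
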